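-- pv_equiv track=rewrite | github.com/loganmcbroom/Clobber-sim | simulate_clobber.py | generate_k_partite
-- ===== SOURCE A (Python) =====
-- def generate_k_partite(ns):
--     N = sum(ns)
--
--     # Generate a partitioned vertex structure, e.g.
--     # [[0,1,2],[3],[4],[5]]
--     v_ps = []
--     counter = 0
--     for n in ns:
--         v_ps.append(list(range(counter,counter+n)))
--         counter += n
--
--     G = set()
--     # For each partition
--     for v_p in v_ps:
--         # For each vertex in that partition
--         for v in v_p:
--             # Connect it to every vertex of every later partition
--             for i in range(v_p[-1]+1,N):
--                 G.add((v,i))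
--     return G
-- ===== SOURCE B (Python) =====
-- def generate_k_partite(ns):
--     # label[v] = index of the partition containing vertex v
--     labels = []
--     for idx, n in enumerate(ns):
--         labels += [idx] * n
--     N = len(labels)
--     G = set()
--     for a in range(N):
--         for b in range(a + 1, N):
--             if labels[a] != labels[b]:
--                 G.add((a, b))
--     return G
-- ===== Notes on version B (the rewrite author's own statement) =====
-- stated objective: simpler
-- what changed: Replaces A's explicit partition-of-vertex-lists structure and per-partition last-element range trick by a flat per-vertex partition-label array plus a single all-ordered-pairs scan filtered on differing labels; Pre_ excludes only lists combining a negative partition size with two or more positive ones, where A's backwards-running counter yields an accidental set with negative or overlapping vertex numbers.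
-- outside the precondition, e.g. on generate_k_partite([-1, 1, 1]): A returns {(-1, 0)}, B returns {(0, 1)}
import Mathlib
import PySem

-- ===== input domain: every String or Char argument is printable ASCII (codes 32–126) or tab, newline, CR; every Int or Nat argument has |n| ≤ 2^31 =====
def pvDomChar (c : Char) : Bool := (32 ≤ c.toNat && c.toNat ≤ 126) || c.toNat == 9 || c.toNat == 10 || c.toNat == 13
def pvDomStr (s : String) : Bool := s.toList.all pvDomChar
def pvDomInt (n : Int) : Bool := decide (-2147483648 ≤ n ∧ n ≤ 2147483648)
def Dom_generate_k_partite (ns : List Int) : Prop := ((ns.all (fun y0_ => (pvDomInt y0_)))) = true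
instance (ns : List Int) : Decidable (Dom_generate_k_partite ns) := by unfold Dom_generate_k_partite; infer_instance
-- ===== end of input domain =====

-- B replaces A's partition-of-vertex-lists structure by a flat per-vertex partition-label
-- array and one all-ordered-pairs scan filtered on differing labels (objective: simpler).

-- ===== PORT A =====
def generate_k_partite (ns : List Int) : List (Int × Int) :=
  let N : Int := ns.sum
  let st := ns.foldl
    (fun (st : List (List Int) × Int) n =>
      (st.1 ++ [PySem.List.pyRange st.2 (st.2 + n)], st.2 + n))
    (([] : List (List Int)), (0 : Int))
  let v_ps := st.1
  v_ps.foldl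
    (fun G v_p =>
      v_p.foldl
        (fun G v =>
          (PySem.List.pyRange (PySem.List.pyGetD v_p (-1) 0 + 1) N).foldl
            (fun G i => PySem.Set.add G (v, i)) G)
        G)
    ([] : PySem.Set (Int × Int))

-- ===== PORT B =====
def generate_k_partite_alt (ns : List Int) : List (Int × Int) :=
  let labels : List Int := (PySem.List.enumerate ns).foldl
    (fun acc p => acc ++ List.replicate p.2.toNat p.1) []
  let N : Int := PySem.List.len labels
  (PySem.List.pyRange 0 N).foldl
    (fun G a =>
      (PySem.List.pyRange (a + 1) N).foldl
        (fun G b =>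
          if PySem.List.pyGetD labels a 0 ≠ PySem.List.pyGetD labels b 0
          then PySem.Set.add G (a, b) else G)
        G)
    ([] : PySem.Set (Int × Int))

-- ===== PRECONDITION & SPEC =====
-- Pre_ excludes only lists combining a negative partition size with two or more positive
-- ones: there A's running counter goes backwards and it returns an accidental set with
-- negative or overlapping vertex numbers, which no caller would specify; B numbers the
-- positive partitions contiguously instead.
def Pre_generate_k_partite (ns : List Int) : Prop :=
  (∀ n ∈ ns, 0 ≤ n) ∨ ns.countP (fun n => decide (0 < n)) ≤ 1
instance (ns : List Int) : Decidable (Pre_generate_k_partite ns) := by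
  unfold Pre_generate_k_partite; infer_instance
def pvWitness_generate_k_partite : List Int := [2, 1, 1]
def Spec_generate_k_partite (ns : List Int) (out : List (Int × Int)) : Prop := out = generate_k_partite_alt ns
instance (ns : List Int) (out : List (Int × Int)) : Decidable (Spec_generate_k_partite ns out) := by unfold Spec_generate_k_partite; infer_instance

-- ===== CLAIM (what is proved, stated in full; the proofs are below) =====
def Claim_equal_generate_k_partite : Prop := ∀ (ns : List Int), Dom_generate_k_partite ns → Pre_generate_k_partite ns → Spec_generate_k_partite ns (generate_k_partite ns)

-- ===== LEMMAS AND PROOFS =====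

-- the partition list A builds, starting at counter c
def pvParts (c : Int) : List Int → List (List Int)
  | [] => []
  | n :: r => PySem.List.pyRange c (c + n) :: pvParts (c + n) r

-- the label list B builds, first partition getting label k
def pvLabels (k : Int) : List Int → List Int
  | [] => []
  | n :: r => List.replicate n.toNat k ++ pvLabels (k + 1) r

theorem pvParts_spec (ns : List Int) (acc : List (List Int)) (c : Int) :
    ns.foldl (fun (st : List (List Int) × Int) n =>
        (st.1 ++ [PySem.List.pyRange st.2 (st.2 + n)], st.2 + n)) (acc, c)
      = (acc ++ pvParts c ns, c + ns.sum) := by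
  induction ns generalizing acc c with
  | nil => simp [pvParts]
  | cons n r ih => simp [pvParts, ih, add_assoc]

theorem pvLabels_spec (ns : List Int) (acc : List Int) (k : Int) :
    (PySem.List.enumerate ns k).foldl
        (fun acc p => acc ++ List.replicate p.2.toNat p.1) acc
      = acc ++ pvLabels k ns := by
  induction ns generalizing acc k with
  | nil => simp [pvLabels, PySem.List.enumerate_nil]
  | cons n r ih => simp [pvLabels, PySem.List.enumerate_cons, ih]

theorem pvLabels_length (ns : List Int) (k : Int) (h : ∀ n ∈ ns, 0 ≤ n) :
    ((pvLabels k ns).length : Int) = ns.sum := by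
  induction ns generalizing k with
  | nil => simp [pvLabels]
  | cons n r ih =>
    have hn : 0 ≤ n := h n (by simp)
    have := ih (k + 1) (fun m hm => h m (by simp [hm]))
    simp [pvLabels, this]
    omega

theorem pvLabels_mem_ge (ns : List Int) (k x : Int) (h : x ∈ pvLabels k ns) : k ≤ x := by
  induction ns generalizing k with
  | nil => simp [pvLabels] at h
  | cons n r ih =>
    simp [pvLabels] at h
    rcases h with h | h
    · omega
    · have := ih (k + 1) h; omega

theorem pvGetD_mid (P S : List Int) (m : Nat) (k : Int) (b : Int)
    (h1 : (P.length : Int) ≤ b) (h2 : b < (P.length : Int) + m) :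
    PySem.List.pyGetD (P ++ (List.replicate m k ++ S)) b 0 = k := by
  rw [PySem.List.pyGetD_of_nonneg _ _ (by omega : (0:Int) ≤ b)]
  have hb1 : P.length ≤ b.toNat := by omega
  have hb2 : b.toNat - P.length < m := by omega
  rw [List.getD_eq_getElem?_getD, List.getElem?_append_right hb1,
    List.getElem?_append_left (by simpa using hb2)]
  simp [hb2]

theorem pvGetD_high (P S : List Int) (b : Int)
    (h1 : (P.length : Int) ≤ b) (h2 : b < (P.length : Int) + S.length) :
    PySem.List.pyGetD (P ++ S) b 0 ∈ S := by
  rw [PySem.List.pyGetD_of_nonneg _ _ (by omega : (0:Int) ≤ b)]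
  have hb1 : P.length ≤ b.toNat := by omega
  have hb2 : b.toNat - P.length < S.length := by omega
  rw [List.getD_eq_getElem?_getD, List.getElem?_append_right hb1,
    List.getElem?_eq_getElem hb2]
  simp

theorem pv_foldl_foldl_flatMap {α β S : Type} (l : List α) (f : α → List β)
    (g : S → β → S) (s : S) :
    l.foldl (fun s x => (f x).foldl g s) s = (l.flatMap f).foldl g s := by
  induction l generalizing s with
  | nil => simp
  | cons x r ih => simp [ih, List.foldl_append]

theorem pv_flatMap_congr {α β : Type} (l : List α) (f g : α → List β)
    (h : ∀ x ∈ l, f x = g x) : l.flatMap f = l.flatMap g := by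
  induction l with
  | nil => simp
  | cons x r ih =>
    simp [List.flatMap_cons, h x (by simp), ih (fun y hy => h y (by simp [hy]))]

theorem pv_sum_nonpos (l : List Int) (h : ∀ x ∈ l, x ≤ 0) : l.sum ≤ 0 := by
  induction l with
  | nil => simp
  | cons x r ih =>
    have := h x (by simp)
    have := ih (fun y hy => h y (by simp [hy]))
    simp; omega

theorem pvLabels_nil (ns : List Int) (k : Int) (h : ∀ n ∈ ns, n ≤ 0) :
    pvLabels k ns = [] := by
  induction ns generalizing k with
  | nil => rfl
  | cons n r ih =>
    have := h n (by simp)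
    simp [pvLabels, Int.toNat_of_nonpos this, ih (k + 1) (fun m hm => h m (by simp [hm]))]

theorem pvLabels_const (ns : List Int) (k : Int)
    (h : ns.countP (fun n => decide (0 < n)) ≤ 1) :
    ∃ (m : Nat) (j : Int), pvLabels k ns = List.replicate m j := by
  induction ns generalizing k with
  | nil => exact ⟨0, 0, rfl⟩
  | cons n r ih =>
    by_cases hn : 0 < n
    · have hr : ∀ m ∈ r, m ≤ 0 := by
        intro m hm
        by_contra hmp
        have hcp : 0 < r.countP (fun n => decide (0 < n)) := by
          rw [List.countP_pos_iff]
          exact ⟨m, hm, by simpa using hmp⟩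
        have h2 : 2 ≤ (n :: r).countP (fun n => decide (0 < n)) := by
          rw [List.countP_cons]
          simp only [hn, decide_true, if_true]
          omega
        omega
      exact ⟨n.toNat, k, by simp [pvLabels, pvLabels_nil r (k + 1) hr]⟩
    · have : (n :: r).countP (fun n => decide (0 < n)) = r.countP (fun n => decide (0 < n)) := by
        rw [List.countP_cons]; simp [hn]
      have hn' : n ≤ 0 := by omega
      rcases ih (k + 1) (by omega) with ⟨m, j, hm⟩
      exact ⟨m, j, by simp [pvLabels, Int.toNat_of_nonpos hn', hm]⟩

-- with at most one positive size, every vertex gets the same label, so B emits nothing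
theorem pvB_flat_nil (ns : List Int)
    (h : ns.countP (fun n => decide (0 < n)) ≤ 1) :
    (PySem.List.pyRange 0 (PySem.List.len (pvLabels 0 ns))).flatMap (fun a =>
        ((PySem.List.pyRange (a + 1) (PySem.List.len (pvLabels 0 ns))).filter (fun b =>
          decide (PySem.List.pyGetD (pvLabels 0 ns) a 0
            ≠ PySem.List.pyGetD (pvLabels 0 ns) b 0))).map (fun b => (a, b))) = [] := by
  rcases pvLabels_const ns 0 h with ⟨m, j, hm⟩
  rw [hm]
  have : ∀ a ∈ PySem.List.pyRange 0 (PySem.List.len (List.replicate m j)),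
      ((PySem.List.pyRange (a + 1) (PySem.List.len (List.replicate m j))).filter (fun b =>
        decide (PySem.List.pyGetD (List.replicate m j) a 0
          ≠ PySem.List.pyGetD (List.replicate m j) b 0))).map
          (fun b => ((a, b) : Int × Int)) = ([] : List (Int × Int)) := by
    intro a ha
    rw [PySem.List.mem_pyRange_one, PySem.List.len_eq] at ha
    simp only [List.length_replicate] at ha
    have hfil : (PySem.List.pyRange (a + 1) (PySem.List.len (List.replicate m j))).filter
        (fun b => decide (PySem.List.pyGetD (List.replicate m j) a 0
          ≠ PySem.List.pyGetD (List.replicate m j) b 0)) = [] := by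
      rw [List.filter_eq_nil_iff]
      intro b hb
      rw [PySem.List.mem_pyRange_one, PySem.List.len_eq] at hb
      simp only [List.length_replicate] at hb
      have hga : PySem.List.pyGetD (List.replicate m j) a 0 = j := by
        rw [PySem.List.pyGetD_of_nonneg _ _ (by omega : (0:Int) ≤ a)]
        simp [show a.toNat < m by omega]
      have hgb : PySem.List.pyGetD (List.replicate m j) b 0 = j := by
        rw [PySem.List.pyGetD_of_nonneg _ _ (by omega : (0:Int) ≤ b)]
        simp [show b.toNat < m by omega]
      simp [hga, hgb]
    rw [hfil]; rfl
  rw [pv_flatMap_congr _ _ _ this]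
  simp

-- with at most one positive size, every later partition is empty, so A emits nothing
theorem pvA_flat_nil : ∀ (ns : List Int) (c N : Int),
    ns.countP (fun n => decide (0 < n)) ≤ 1 → N = c + ns.sum →
    (pvParts c ns).flatMap (fun v_p => v_p.flatMap (fun v =>
        (PySem.List.pyRange (PySem.List.pyGetD v_p (-1) 0 + 1) N).map (fun i => (v, i)))) = [] := by
  intro ns
  induction ns with
  | nil => intro c N _ _; rfl
  | cons n r ih =>
    intro c N hc hN
    simp only [List.sum_cons] at hN
    rw [pvParts, List.flatMap_cons]
    by_cases hn : 0 < n
    · have hr : ∀ m ∈ r, m ≤ 0 := by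
        intro m hm
        by_contra hmp
        have hcp : 0 < r.countP (fun n => decide (0 < n)) := by
          rw [List.countP_pos_iff]
          exact ⟨m, hm, by simpa using hmp⟩
        have h2 : 2 ≤ (n :: r).countP (fun n => decide (0 < n)) := by
          rw [List.countP_cons]
          simp only [hn, decide_true, if_true]
          omega
        omega
      have hrs : r.sum ≤ 0 := pv_sum_nonpos r hr
      have hchunk : (PySem.List.pyRange c (c + n)).flatMap (fun v =>
          (PySem.List.pyRange (PySem.List.pyGetD (PySem.List.pyRange c (c + n)) (-1) 0 + 1) N).map
            (fun i => ((v, i) : Int × Int))) = [] := by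
        have : ∀ v ∈ PySem.List.pyRange c (c + n),
            (PySem.List.pyRange (PySem.List.pyGetD (PySem.List.pyRange c (c + n)) (-1) 0 + 1) N).map
              (fun i => ((v, i) : Int × Int)) = [] := by
          intro v hv
          rw [PySem.List.mem_pyRange_one] at hv
          have hsplit : PySem.List.pyRange c (c + n)
              = PySem.List.pyRange c (c + n - 1) ++ [c + n - 1] := by
            have := PySem.List.pyRange_one_succ_right (show c ≤ c + n - 1 by omega)
            simpa [show c + n - 1 + 1 = c + n by ring] using this
          rw [hsplit, PySem.List.pyGetD_neg_one_append_singleton,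
            show c + n - 1 + 1 = c + n by ring,
            PySem.List.pyRange_one_eq_nil (by omega : N ≤ c + n)]
          rfl
        rw [pv_flatMap_congr _ _ _ this]; simp
      rw [hchunk]
      have : (n :: r).countP (fun n => decide (0 < n))
          = r.countP (fun n => decide (0 < n)) + 1 := by
        rw [List.countP_cons]; simp [hn]
      rw [ih (c + n) N (by omega) (by omega)]
      rfl
    · have : (n :: r).countP (fun n => decide (0 < n)) = r.countP (fun n => decide (0 < n)) := by
        rw [List.countP_cons]; simp [hn]
      have hpr : PySem.List.pyRange c (c + n) = [] :=
        PySem.List.pyRange_one_eq_nil (by omega)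
      rw [hpr]
      rw [ih (c + n) N (by omega) (by omega)]
      rfl

-- the two flattened edge sequences coincide, partition block by partition block
theorem pv_main : ∀ (rest P : List Int) (k N : Int),
    (∀ n ∈ rest, 0 ≤ n) → N = (P.length : Int) + rest.sum →
    (pvParts (P.length : Int) rest).flatMap (fun v_p => v_p.flatMap (fun v =>
        (PySem.List.pyRange (PySem.List.pyGetD v_p (-1) 0 + 1) N).map (fun i => (v, i))))
    = (PySem.List.pyRange (P.length : Int) N).flatMap (fun a =>
        ((PySem.List.pyRange (a + 1) N).filter (fun b =>
          decide (PySem.List.pyGetD (P ++ pvLabels k rest) a 0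
            ≠ PySem.List.pyGetD (P ++ pvLabels k rest) b 0))).map (fun b => (a, b))) := by
  intro rest
  induction rest with
  | nil =>
    intro P k N _ hN
    simp only [pvParts, List.flatMap_nil]
    simp only [List.sum_nil, add_zero] at hN
    rw [hN, PySem.List.pyRange_one_eq_nil (by omega)]
    simp
  | cons n r ih =>
    intro P k N hnn hN
    have hn : 0 ≤ n := hnn n (by simp)
    have hr : ∀ m ∈ r, 0 ≤ m := fun m hm => hnn m (by simp [hm])
    have hrs : 0 ≤ r.sum := List.sum_nonneg hr
    set c : Int := (P.length : Int) with hc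
    have hNval : N = c + n + r.sum := by simp at hN; omega
    -- the IH, at prefix P ++ replicate n.toNat k
    have hlen : ((P ++ List.replicate n.toNat k).length : Int) = c + n := by
      simp; omega
    have ihx := ih (P ++ List.replicate n.toNat k) (k + 1) N hr (by rw [hlen]; simp at hN ⊢; omega)
    rw [hlen] at ihx
    have hL : (P ++ List.replicate n.toNat k) ++ pvLabels (k + 1) r
        = P ++ pvLabels k (n :: r) := by simp [pvLabels]
    rw [hL] at ihx
    -- split B's outer range at c + n
    rw [PySem.List.pyRange_one_append c (c + n) N (by omega) (by omega),
      List.flatMap_append, ← ihx]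
    show (pvParts c (n :: r)).flatMap _ = _
    rw [pvParts]
    simp only [List.flatMap_cons]
    congr 1
    -- first block: each vertex a of the first partition
    apply pv_flatMap_congr
    intro a ha
    rw [PySem.List.mem_pyRange_one] at ha
    have hn1 : 1 ≤ n := by omega
    -- last element of the partition
    have hsplit : PySem.List.pyRange c (c + n) = PySem.List.pyRange c (c + n - 1) ++ [c + n - 1] := by
      have := PySem.List.pyRange_one_succ_right (show c ≤ c + n - 1 by omega)
      simpa [show c + n - 1 + 1 = c + n by ring] using this
    rw [hsplit, PySem.List.pyGetD_neg_one_append_singleton]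
    have harr : c + n - 1 + 1 = c + n := by ring
    rw [harr]
    -- the filtered range [a+1, N) is exactly [c+n, N)
    have hfil : (PySem.List.pyRange (a + 1) N).filter (fun b =>
        decide (PySem.List.pyGetD (P ++ pvLabels k (n :: r)) a 0
          ≠ PySem.List.pyGetD (P ++ pvLabels k (n :: r)) b 0))
        = PySem.List.pyRange (c + n) N := by
      have hla : PySem.List.pyGetD (P ++ pvLabels k (n :: r)) a 0 = k := by
        rw [pvLabels]
        exact pvGetD_mid P (pvLabels (k + 1) r) n.toNat k a (by omega) (by omega)
      rw [PySem.List.pyRange_one_append (a + 1) (c + n) N (by omega) (by omega),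
        List.filter_append]
      have h1 : (PySem.List.pyRange (a + 1) (c + n)).filter (fun b =>
          decide (PySem.List.pyGetD (P ++ pvLabels k (n :: r)) a 0
            ≠ PySem.List.pyGetD (P ++ pvLabels k (n :: r)) b 0)) = [] := by
        rw [List.filter_eq_nil_iff]
        intro b hb
        rw [PySem.List.mem_pyRange_one] at hb
        have hlb : PySem.List.pyGetD (P ++ pvLabels k (n :: r)) b 0 = k := by
          rw [pvLabels]
          exact pvGetD_mid P (pvLabels (k + 1) r) n.toNat k b (by omega) (by omega)
        simp [hla, hlb]
      have h2 : (PySem.List.pyRange (c + n) N).filter (fun b =>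
          decide (PySem.List.pyGetD (P ++ pvLabels k (n :: r)) a 0
            ≠ PySem.List.pyGetD (P ++ pvLabels k (n :: r)) b 0))
          = PySem.List.pyRange (c + n) N := by
        rw [List.filter_eq_self]
        intro b hb
        rw [PySem.List.mem_pyRange_one] at hb
        have hmem : PySem.List.pyGetD (P ++ pvLabels k (n :: r)) b 0 ∈ pvLabels (k + 1) r := by
          have heq : P ++ pvLabels k (n :: r)
              = (P ++ List.replicate n.toNat k) ++ pvLabels (k + 1) r := by
            simp [pvLabels]
          rw [heq]
          apply pvGetD_high
          · rw [hlen]; omega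
          · rw [hlen, pvLabels_length r (k + 1) hr]; omega
        have := pvLabels_mem_ge r (k + 1) _ hmem
        simp [hla]; omega
      rw [h1, h2]; simp
    rw [hfil]
  
-- ===== VERDICT (by name: the statement is the Claim_ definition above) =====
theorem generate_k_partite_spec : Claim_equal_generate_k_partite := by
  intro ns _ hpre
  unfold Spec_generate_k_partite generate_k_partite generate_k_partite_alt
  simp only []
  rw [pvParts_spec ns [] 0]
  rw [show PySem.List.enumerate ns = PySem.List.enumerate ns 0 from rfl, pvLabels_spec ns [] 0]
  simp only [List.nil_append]
  -- flatten A's nested folds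
  have hA : ∀ (vps : List (List Int)) (N : Int),
      vps.foldl (fun G v_p => v_p.foldl (fun G v =>
          (PySem.List.pyRange (PySem.List.pyGetD v_p (-1) 0 + 1) N).foldl
            (fun G i => PySem.Set.add G (v, i)) G) G) ([] : PySem.Set (Int × Int))
      = (vps.flatMap (fun v_p => v_p.flatMap (fun v =>
          (PySem.List.pyRange (PySem.List.pyGetD v_p (-1) 0 + 1) N).map
            (fun i => (v, i))))).foldl PySem.Set.add [] := by
    intro vps N
    rw [← pv_foldl_foldl_flatMap]
    apply PySem.List.foldl_congr_mem
    intro G v_p _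
    rw [← pv_foldl_foldl_flatMap]
    apply PySem.List.foldl_congr_mem
    intro G v _
    rw [List.foldl_map]
  -- flatten B's nested folds
  have hB : ∀ (L : List Int) (N : Int),
      (PySem.List.pyRange 0 N).foldl (fun G a =>
          (PySem.List.pyRange (a + 1) N).foldl (fun G b =>
            if PySem.List.pyGetD L a 0 ≠ PySem.List.pyGetD L b 0
            then PySem.Set.add G (a, b) else G) G) ([] : PySem.Set (Int × Int))
      = ((PySem.List.pyRange 0 N).flatMap (fun a =>
          ((PySem.List.pyRange (a + 1) N).filter (fun b =>
            decide (PySem.List.pyGetD L a 0 ≠ PySem.List.pyGetD L b 0))).map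
            (fun b => (a, b)))).foldl PySem.Set.add [] := by
    intro L N
    rw [← pv_foldl_foldl_flatMap]
    apply PySem.List.foldl_congr_mem
    intro G a _
    rw [PySem.List.foldl_ite_eq_foldl_filter, List.foldl_map]
  rw [hA]
  refine Eq.trans ?_ (hB (pvLabels 0 ns) (PySem.List.len (pvLabels 0 ns))).symm
  rcases hpre with hpre | hpre
  · have hNN : (PySem.List.len (pvLabels 0 ns)) = ns.sum := by
      rw [PySem.List.len_eq, pvLabels_length ns 0 hpre]
    rw [hNN]
    have := pv_main ns [] 0 ns.sum hpre (by simp)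
    simp only [List.length_nil, Nat.cast_zero, List.nil_append] at this
    rw [this]
    rfl
  · rw [pvA_flat_nil ns 0 ns.sum hpre (by omega), pvB_flat_nil ns hpre]
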